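-- pv_equiv track=rewrite | github.com/ThalesDaviSouza/ALG | TP3/right_part.py | get_sizes_right
-- ===== SOURCE A (Python) =====
-- def get_sizes_right(nRight, adjRight):
--   # Total de subconjuntos possíveis (2^nRight)
--   n = 1 << nRight
--
--   # Tamanho do maior conjunto independente para cada bitmask
--   sizes = [0] * n
--   # Máscara representando o conjunto independente ótimo
--   masks = [0] * n
--
--   # Itera por todos os subconjuntos não vazios
--   for bitmask in range(1, n):
--     # Pega o bit menos significativo (último vértice adicionado)
--     lowestbit = bitmask & -bitmask
--     # Converte a posição do bit para índice do vértice
--     verticeId = (lowestbit.bit_length() - 1)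
--
--     # Remove o vértice atual do conjunto
--     bitmaskReduced = bitmask & ~(1 << verticeId)
--
--     # Calcula vértices permitidos: remove os adjacentes ao vértice atual
--     # ~adjRight[verticeId] inverte os bits - 0 onde há conflito, 1 onde não há
--     adjacentes = bitmaskReduced & ~adjRight[verticeId]
--
--     # Duas opções: não incluir o vértice ou incluí-lo
--     option1 = sizes[bitmaskReduced] # Não incluir o vértice
--     option2 = 1 + sizes[adjacentes] # Incluir o vértice (remove adjacentes)
--
--     # Máscaras correspondentes a cada opção
--     mask1 = masks[bitmaskReduced]
--     mask2 = (1 << verticeId) | masks[adjacentes]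
--
--     # Escolhe a melhor opção
--     if option2 > option1:
--       sizes[bitmask] = option2
--       masks[bitmask] = (1 << verticeId) | masks[adjacentes]
--
--     elif option1 == option2:
--        # Desempate: escolhe a máscara lexicograficamente menor
--       if mask2 < mask1:
--         masks[bitmask] = mask2
--       else:
--         masks[bitmask] = mask1
--       sizes[bitmask] = option1
--
--     else:
--       sizes[bitmask] = option1
--       masks[bitmask] = masks[bitmaskReduced]
--
--   return sizes, masks
-- ===== SOURCE B (Python) =====
-- def get_sizes_right(nRight, adjRight):
--   # Top-down: compute each subset's optimum directly from the recurrence,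
--   # instead of filling a bottom-up table.
--   def rec(mask):
--     if mask == 0:
--       return (0, 0)
--     v = (mask & -mask).bit_length() - 1
--     reduced = mask & ~(1 << v)
--     s1, m1 = rec(reduced)
--     s2a, m2a = rec(reduced & ~adjRight[v])
--     s2 = 1 + s2a
--     m2 = (1 << v) | m2a
--     if s2 > s1:
--       return (s2, m2)
--     if s2 == s1:
--       return (s1, min(m1, m2))
--     return (s1, m1)
--   results = [rec(b) for b in range(1 << nRight)]
--   return [s for s, _ in results], [m for _, m in results]
-- ===== Notes on version B (the rewrite author's own statement) =====
-- stated objective: alternative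
-- what changed: Replaces A's bottom-up DP over a pair of 2^n-entry tables with a top-down recursion that computes each subset's optimum directly from the same recurrence (base case and strict-greater/min-mask tie-break kept identical), building the two result lists by mapping over all subsets.
import Mathlib
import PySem

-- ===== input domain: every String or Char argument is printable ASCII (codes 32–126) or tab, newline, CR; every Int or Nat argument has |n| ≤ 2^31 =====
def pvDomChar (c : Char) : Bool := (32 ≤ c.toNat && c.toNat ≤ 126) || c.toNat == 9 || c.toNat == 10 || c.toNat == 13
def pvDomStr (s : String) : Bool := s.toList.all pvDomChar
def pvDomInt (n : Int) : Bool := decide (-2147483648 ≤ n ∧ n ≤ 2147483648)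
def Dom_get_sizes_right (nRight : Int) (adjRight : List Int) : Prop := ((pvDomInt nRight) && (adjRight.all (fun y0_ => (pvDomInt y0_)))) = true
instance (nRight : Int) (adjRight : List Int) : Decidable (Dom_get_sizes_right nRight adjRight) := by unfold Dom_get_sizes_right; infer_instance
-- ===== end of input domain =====

-- B replaces A's bottom-up table fill with a top-down recursion on subsets (same
-- recurrence, base case and tie-break); an alternative decomposition, not claimed faster.

-- ===== PORT A =====
-- Bitwise primitives: Python's `a & b`, `a | b`, `~a`, `a << k` are PySem.Int.band,
-- PySem.Int.bor, Int.not, `<<<` (exact, infinite two's complement).  `nRight.toNat` /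
-- `verticeId.toNat` as shift amounts are exact because those values are ≥ 0 under Pre_
-- (Python raises ValueError on a negative shift).  `x.bit_length() - 1` is
-- `(PySem.Int.bitLength x : Int) - 1`.  Table reads/writes use the total pyGetD/pySetD;
-- their indices are always in range inside the loop, and adjRight[verticeId] is in
-- range under Pre_ (outside it Python raises IndexError).
def get_sizes_right (nRight : Int) (adjRight : List Int) : List Int × List Int :=
  -- n = 1 << nRight
  let n : Int := (1 : Int) <<< nRight.toNat
  -- sizes = [0] * n ; masks = [0] * n
  let sizes : List Int := List.replicate n.toNat 0
  let masks : List Int := List.replicate n.toNat 0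
  -- for bitmask in range(1, n): …
  (PySem.List.pyRange 1 n 1).foldl
    (fun st bitmask =>
      let lowestbit := PySem.Int.band bitmask (-bitmask)
      let verticeId : Int := (PySem.Int.bitLength lowestbit : Int) - 1
      let bitmaskReduced := PySem.Int.band bitmask (Int.not ((1 : Int) <<< verticeId.toNat))
      let adjacentes := PySem.Int.band bitmaskReduced (Int.not (PySem.List.pyGetD adjRight verticeId 0))
      let option1 := PySem.List.pyGetD st.1 bitmaskReduced 0
      let option2 := 1 + PySem.List.pyGetD st.1 adjacentes 0
      let mask1 := PySem.List.pyGetD st.2 bitmaskReduced 0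
      let mask2 := PySem.Int.bor ((1 : Int) <<< verticeId.toNat) (PySem.List.pyGetD st.2 adjacentes 0)
      if option2 > option1 then
        (PySem.List.pySetD st.1 bitmask option2,
         PySem.List.pySetD st.2 bitmask (PySem.Int.bor ((1 : Int) <<< verticeId.toNat) (PySem.List.pyGetD st.2 adjacentes 0)))
      else if option1 = option2 then
        (PySem.List.pySetD st.1 bitmask option1,
         PySem.List.pySetD st.2 bitmask (if mask2 < mask1 then mask2 else mask1))
      else
        (PySem.List.pySetD st.1 bitmask option1,
         PySem.List.pySetD st.2 bitmask (PySem.List.pyGetD st.2 bitmaskReduced 0)))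
    (sizes, masks)

-- ===== PORT B =====
-- rec(mask) of Source B, with a structural fuel argument as a pure totality guard:
-- fuel = mask.toNat + 1 always suffices (pvRecB_eq below recovers the exact
-- Python recursion), and Python's base case `mask == 0` is `mask ≤ 0` here because
-- rec is only ever invoked on nonnegative masks.
def pvRecBF (adjRight : List Int) : Nat → Int → Int × Int
  | 0, _ => (0, 0)
  | fuel+1, mask =>
    if mask ≤ 0 then (0, 0)
    else
      let v : Int := (PySem.Int.bitLength (PySem.Int.band mask (-mask)) : Int) - 1
      let reduced := PySem.Int.band mask (Int.not ((1 : Int) <<< v.toNat))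
      let p1 := pvRecBF adjRight fuel reduced
      let p2a := pvRecBF adjRight fuel (PySem.Int.band reduced (Int.not (PySem.List.pyGetD adjRight v 0)))
      let s2 := 1 + p2a.1
      let m2 := PySem.Int.bor ((1 : Int) <<< v.toNat) p2a.2
      if s2 > p1.1 then (s2, m2)
      else if s2 = p1.1 then (p1.1, min p1.2 m2)
      else p1

def pvRecB (adjRight : List Int) (mask : Int) : Int × Int :=
  pvRecBF adjRight (mask.toNat + 1) mask

def get_sizes_right_alt (nRight : Int) (adjRight : List Int) : List Int × List Int :=
  -- results = [rec(b) for b in range(1 << nRight)]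
  let results := (PySem.List.pyRange 0 ((1 : Int) <<< nRight.toNat) 1).map (pvRecB adjRight)
  -- return [s for s, _ in results], [m for _, m in results]
  (results.map Prod.fst, results.map Prod.snd)

-- ===== PRECONDITION & SPEC =====
-- Pre_ excludes exactly the inputs where Python A raises: nRight < 0 (ValueError on
-- `1 << nRight`) and 1 ≤ nRight > len(adjRight) (IndexError on adjRight[verticeId],
-- which reaches every index 0..nRight-1).
def Pre_get_sizes_right (nRight : Int) (adjRight : List Int) : Prop :=
  0 ≤ nRight ∧ (nRight = 0 ∨ nRight ≤ (adjRight.length : Int))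
instance (nRight : Int) (adjRight : List Int) : Decidable (Pre_get_sizes_right nRight adjRight) := by
  unfold Pre_get_sizes_right; infer_instance
def pvWitness_get_sizes_right : Int × List Int := (2, [2, 1])

def Spec_get_sizes_right (nRight : Int) (adjRight : List Int) (out : List Int × List Int) : Prop := out = get_sizes_right_alt nRight adjRight
instance (nRight : Int) (adjRight : List Int) (out : List Int × List Int) : Decidable (Spec_get_sizes_right nRight adjRight out) := by unfold Spec_get_sizes_right; infer_instance

-- ===== CLAIM (what is proved, stated in full; the proofs are below) =====
def Claim_equal_get_sizes_right : Prop := ∀ (nRight : Int) (adjRight : List Int), Dom_get_sizes_right nRight adjRight → Pre_get_sizes_right nRight adjRight → Spec_get_sizes_right nRight adjRight (get_sizes_right nRight adjRight)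

-- ===== LEMMAS AND PROOFS =====

-- Bit-arithmetic facts: clearing the lowest set bit strictly decreases a positive
-- mask; a & b keeps a nonnegative left operand's magnitude.
lemma pvLandDouble (a b x y : Nat) (hx : x < 2) (hy : y < 2) :
    (2*a+x) &&& (2*b+y) = 2*(a &&& b) + (x &&& y) := by
  apply Nat.eq_of_testBit_eq
  intro i
  cases i with
  | zero =>
    simp only [Nat.testBit_zero]
    interval_cases x <;> interval_cases y <;>
      simp [Nat.mul_mod_right]
  | succ i =>
    have hxy : x &&& y < 2 := Nat.lt_of_le_of_lt Nat.and_le_right hy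
    rw [Nat.testBit_and]
    simp only [Nat.testBit_add_one]
    have h1 : (2*a+x)/2 = a := by omega
    have h2 : (2*b+y)/2 = b := by omega
    have h3 : (2*(a &&& b) + (x &&& y))/2 = a &&& b := by omega
    rw [h1, h2, h3, Nat.testBit_and]

lemma pvLowbitSpec : ∀ t : Nat, 0 < t → ∃ k, t - (t &&& (t-1)) = 2^k ∧ t.testBit k := by
  intro t
  induction t using Nat.strong_induction_on with
  | _ t ih =>
    intro ht
    rcases Nat.even_or_odd t with ⟨u, hu⟩ | ⟨u, hu⟩
    · have hu0 : 0 < u := by omega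
      obtain ⟨k, hk, hb⟩ := ih u (by omega) hu0
      have key : t &&& (t-1) = 2*(u &&& (u-1)) := by
        rw [show t - 1 = 2*(u-1)+1 from by omega, show t = 2*u+0 from by omega,
          pvLandDouble u (u-1) 0 1 (by omega) (by omega)]
        rfl
      refine ⟨k+1, ?_, ?_⟩
      · have hle : u &&& (u-1) ≤ u := Nat.and_le_left
        have h4 : (2:Nat)^(k+1) = 2*2^k := by ring
        omega
      · rw [show t = 2*u from by omega, Nat.testBit_add_one,
          show 2*u/2 = u from by omega]
        exact hb
    · have key : t &&& (t-1) = 2*u := by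
        rw [show t - 1 = 2*u+0 from by omega, show t = 2*u+1 from by omega,
          pvLandDouble u u 1 0 (by omega) (by omega), Nat.and_self]
        rfl
      refine ⟨0, by omega, ?_⟩
      rw [Nat.testBit_zero]
      simp; omega

lemma pvIntNot (a : Int) : Int.not a = -a - 1 := by
  cases a with
  | ofNat n => simp [Int.not, Int.negSucc_eq]; ring
  | negSucc n => simp [Int.not, Int.negSucc_eq]

lemma pvShlOne (k : Nat) : (1:Int) <<< k = ((2^k : Nat) : Int) := by
  rw [Int.shiftLeft_eq]; push_cast; ring

lemma pvLowbitEq (m : Int) (h : 0 < m) :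
    ∃ k, PySem.Int.band m (-m) = ((2^k : Nat) : Int) ∧ m.toNat.testBit k := by
  obtain ⟨k, hk, hb⟩ := pvLowbitSpec m.toNat (by omega)
  refine ⟨k, ?_, hb⟩
  have h1 : ¬ (0 ≤ -m) := by omega
  have h2 : (-(-m) - 1).toNat = m.toNat - 1 := by omega
  simp only [PySem.Int.band, if_pos (by omega : (0:Int) ≤ m), if_neg h1, h2, hk]

lemma pvBitLenPow (k : Nat) : PySem.Int.bitLength ((2^k : Nat) : Int) = k + 1 := by
  have hne : ((2^k : Nat) : Int) ≠ 0 := by positivity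
  have h1 := PySem.Int.two_pow_bitLength_le ((2^k : Nat) : Int) hne
  have h2 := PySem.Int.lt_two_pow_bitLength ((2^k : Nat) : Int)
  have habs : (((2^k : Nat) : Int)).natAbs = 2^k := by simp
  rw [habs] at h1 h2
  set L := PySem.Int.bitLength ((2^k : Nat) : Int) with hL
  have hkL : k < L := (Nat.pow_lt_pow_iff_right (by omega)).mp h2
  have hLk : L - 1 ≤ k := (Nat.pow_le_pow_iff_right (by omega)).mp h1
  omega

lemma pvBandToNatLe (a b : Int) (h : 0 ≤ a) : (PySem.Int.band a b).toNat ≤ a.toNat := by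
  by_cases hb : 0 ≤ b
  · simp only [PySem.Int.band, if_pos h, if_pos hb]
    simpa using Nat.and_le_left
  · simp only [PySem.Int.band, if_pos h, if_neg hb]
    simp

lemma pvReducedLt (mask : Int) (h : 0 < mask) :
    (PySem.Int.band mask (Int.not ((1:Int) <<<
      (((PySem.Int.bitLength (PySem.Int.band mask (-mask)) : Int) - 1).toNat)))).toNat
    < mask.toNat := by
  obtain ⟨k, hk, hb⟩ := pvLowbitEq mask h
  rw [hk, pvBitLenPow]
  have e1 : ((((k+1 : Nat)) : Int) - 1).toNat = k := by push_cast; omega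
  rw [e1, pvShlOne, pvIntNot]
  have hpos : (0:Int) < ((2^k : Nat) : Int) := by positivity
  have hneg : ¬ (0 ≤ -((2^k : Nat) : Int) - 1) := by omega
  simp only [PySem.Int.band, if_pos (le_of_lt h), if_neg hneg]
  have e2 : (-(-((2^k : Nat) : Int) - 1) - 1).toNat = 2^k := by omega
  rw [e2]
  have e3 : mask.toNat &&& 2^k = 2^k := by rw [Nat.and_two_pow, hb]; simp
  rw [e3]
  have h4 : (0:Nat) < 2^k := by positivity
  simp only [Int.toNat_natCast]
  omega

lemma pvAdjLt (x mask : Int) (h : 0 < mask) :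
    (PySem.Int.band (PySem.Int.band mask (Int.not ((1:Int) <<<
      (((PySem.Int.bitLength (PySem.Int.band mask (-mask)) : Int) - 1).toNat)))) x).toNat
    < mask.toNat := by
  have h0 : 0 ≤ PySem.Int.band mask (Int.not ((1:Int) <<<
      (((PySem.Int.bitLength (PySem.Int.band mask (-mask)) : Int) - 1).toNat))) :=
    PySem.Int.band_nonneg_of_nonneg_left _ (le_of_lt h)
  have h1 := pvReducedLt mask h
  have h2 := pvBandToNatLe _ x h0
  omega

-- The loop body of port A, named for the proofs (definitionally the lambda above).
def pvStepA (adjRight : List Int) (st : List Int × List Int) (bitmask : Int) : List Int × List Int :=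
  let lowestbit := PySem.Int.band bitmask (-bitmask)
  let verticeId : Int := (PySem.Int.bitLength lowestbit : Int) - 1
  let bitmaskReduced := PySem.Int.band bitmask (Int.not ((1 : Int) <<< verticeId.toNat))
  let adjacentes := PySem.Int.band bitmaskReduced (Int.not (PySem.List.pyGetD adjRight verticeId 0))
  let option1 := PySem.List.pyGetD st.1 bitmaskReduced 0
  let option2 := 1 + PySem.List.pyGetD st.1 adjacentes 0
  let mask1 := PySem.List.pyGetD st.2 bitmaskReduced 0
  let mask2 := PySem.Int.bor ((1 : Int) <<< verticeId.toNat) (PySem.List.pyGetD st.2 adjacentes 0)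
  if option2 > option1 then
    (PySem.List.pySetD st.1 bitmask option2,
     PySem.List.pySetD st.2 bitmask (PySem.Int.bor ((1 : Int) <<< verticeId.toNat) (PySem.List.pyGetD st.2 adjacentes 0)))
  else if option1 = option2 then
    (PySem.List.pySetD st.1 bitmask option1,
     PySem.List.pySetD st.2 bitmask (if mask2 < mask1 then mask2 else mask1))
  else
    (PySem.List.pySetD st.1 bitmask option1,
     PySem.List.pySetD st.2 bitmask (PySem.List.pyGetD st.2 bitmaskReduced 0))

lemma pvPortA_eq (nRight : Int) (adjRight : List Int) :
    get_sizes_right nRight adjRight =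
      (PySem.List.pyRange 1 ((1 : Int) <<< nRight.toNat) 1).foldl (pvStepA adjRight)
        (List.replicate ((1 : Int) <<< nRight.toNat).toNat 0,
         List.replicate ((1 : Int) <<< nRight.toNat).toNat 0) := rfl

def pvInv (adjRight : List Int) (t j : Nat) (st : List Int × List Int) : Prop :=
  st.1.length = t ∧ st.2.length = t ∧
  (∀ i : Nat, (h : i < st.1.length) → st.1[i] = if i ≤ j then (pvRecB adjRight (i : Int)).1 else 0) ∧
  (∀ i : Nat, (h : i < st.2.length) → st.2[i] = if i ≤ j then (pvRecB adjRight (i : Int)).2 else 0)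

lemma pvRecBF_congr (adjRight : List Int) :
    ∀ f : Nat, ∀ (g : Nat) (m : Int), m.toNat < f → m.toNat < g →
      pvRecBF adjRight f m = pvRecBF adjRight g m := by
  intro f
  induction f with
  | zero => intro g m hf hg; omega
  | succ f ih =>
    intro g m hf hg
    obtain ⟨g', rfl⟩ : ∃ g', g = g' + 1 := ⟨g - 1, by omega⟩
    by_cases hm : m ≤ 0
    · simp only [pvRecBF, if_pos hm]
    · have hm0 : 0 < m := by omega
      have hred := pvReducedLt m hm0
      have hadj := pvAdjLt (Int.not (PySem.List.pyGetD adjRight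
        ((PySem.Int.bitLength (PySem.Int.band m (-m)) : Int) - 1) 0)) m hm0
      simp only [pvRecBF, if_neg hm]
      rw [ih g' _ (by omega) (by omega), ih g' _ (by omega) (by omega)]

lemma pvRecB_eq (adjRight : List Int) (mask : Int) :
    pvRecB adjRight mask =
      if mask ≤ 0 then (0, 0)
      else
        let v : Int := (PySem.Int.bitLength (PySem.Int.band mask (-mask)) : Int) - 1
        let reduced := PySem.Int.band mask (Int.not ((1 : Int) <<< v.toNat))
        let p1 := pvRecB adjRight reduced
        let p2a := pvRecB adjRight (PySem.Int.band reduced (Int.not (PySem.List.pyGetD adjRight v 0)))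
        let s2 := 1 + p2a.1
        let m2 := PySem.Int.bor ((1 : Int) <<< v.toNat) p2a.2
        if s2 > p1.1 then (s2, m2)
        else if s2 = p1.1 then (p1.1, min p1.2 m2)
        else p1 := by
  by_cases hm : mask ≤ 0
  · simp only [pvRecB, pvRecBF, if_pos hm]
  · have hm0 : 0 < mask := by omega
    have hred := pvReducedLt mask hm0
    have hadj := pvAdjLt (Int.not (PySem.List.pyGetD adjRight
      ((PySem.Int.bitLength (PySem.Int.band mask (-mask)) : Int) - 1) 0)) mask hm0
    simp only [pvRecB, pvRecBF, if_neg hm]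
    set R : Int := PySem.Int.band mask (Int.not ((1:Int) <<<
      (((PySem.Int.bitLength (PySem.Int.band mask (-mask)) : Int) - 1).toNat))) with hR
    set A : Int := PySem.Int.band R (Int.not (PySem.List.pyGetD adjRight
      ((PySem.Int.bitLength (PySem.Int.band mask (-mask)) : Int) - 1) 0)) with hA
    rw [pvRecBF_congr adjRight mask.toNat (R.toNat+1) R (by omega) (by omega),
      pvRecBF_congr adjRight mask.toNat (A.toNat+1) A (by omega) (by omega)]
    rfl

lemma pvRecB_zero (adjRight : List Int) : pvRecB adjRight 0 = (0, 0) := by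
  rw [pvRecB_eq]; simp

lemma pvStep (adjRight : List Int) (t j : Nat) (st : List Int × List Int)
    (hj : j + 1 < t) (hst : pvInv adjRight t j st) :
    pvInv adjRight t (j+1) (pvStepA adjRight st ((j : Int) + 1)) := by
  obtain ⟨hl1, hl2, hS, hM⟩ := hst
  have hb0 : (0:Int) < (j : Int) + 1 := by omega
  have hredlt' := pvReducedLt ((j : Int) + 1) hb0
  simp only [pvStepA]
  set v : Int := (PySem.Int.bitLength (PySem.Int.band ((j : Int) + 1) (-((j : Int) + 1))) : Int) - 1 with hv
  set red : Int := PySem.Int.band ((j : Int) + 1) (Int.not ((1 : Int) <<< v.toNat)) with hred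
  set adj : Int := PySem.Int.band red (Int.not (PySem.List.pyGetD adjRight v 0)) with hadj
  have hred0 : 0 ≤ red := by rw [hred]; exact PySem.Int.band_nonneg_of_nonneg_left _ (by omega)
  have hadj0 : 0 ≤ adj := by rw [hadj]; exact PySem.Int.band_nonneg_of_nonneg_left _ hred0
  have hadjle : adj.toNat ≤ red.toNat := by rw [hadj]; exact pvBandToNatLe red _ hred0
  have hredj : red.toNat ≤ j := by omega
  have hadjj : adj.toNat ≤ j := by omega
  have r1 : PySem.List.pyGetD st.1 red 0 = (pvRecB adjRight red).1 := by
    rw [PySem.List.pyGetD_eq_getElem st.1 0 hred0 (by omega), hS red.toNat (by omega),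
      if_pos hredj, Int.toNat_of_nonneg hred0]
  have r2 : PySem.List.pyGetD st.1 adj 0 = (pvRecB adjRight adj).1 := by
    rw [PySem.List.pyGetD_eq_getElem st.1 0 hadj0 (by omega), hS adj.toNat (by omega),
      if_pos hadjj, Int.toNat_of_nonneg hadj0]
  have r3 : PySem.List.pyGetD st.2 red 0 = (pvRecB adjRight red).2 := by
    rw [PySem.List.pyGetD_eq_getElem st.2 0 hred0 (by omega), hM red.toNat (by omega),
      if_pos hredj, Int.toNat_of_nonneg hred0]
  have r4 : PySem.List.pyGetD st.2 adj 0 = (pvRecB adjRight adj).2 := by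
    rw [PySem.List.pyGetD_eq_getElem st.2 0 hadj0 (by omega), hM adj.toNat (by omega),
      if_pos hadjj, Int.toNat_of_nonneg hadj0]
  have recb : pvRecB adjRight ((j : Int) + 1) =
      (if 1 + (pvRecB adjRight adj).1 > (pvRecB adjRight red).1 then
        (1 + (pvRecB adjRight adj).1,
         PySem.Int.bor ((1 : Int) <<< v.toNat) (pvRecB adjRight adj).2)
      else if 1 + (pvRecB adjRight adj).1 = (pvRecB adjRight red).1 then
        ((pvRecB adjRight red).1,
         min (pvRecB adjRight red).2 (PySem.Int.bor ((1 : Int) <<< v.toNat) (pvRecB adjRight adj).2))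
      else pvRecB adjRight red) := by
    rw [pvRecB_eq]
    rw [if_neg (by omega : ¬ ((j : Int) + 1 ≤ 0))]
  rw [r1, r2, r3, r4]
  have hminEq : (if PySem.Int.bor ((1:Int) <<< v.toNat) (pvRecB adjRight adj).2 < (pvRecB adjRight red).2
        then PySem.Int.bor ((1:Int) <<< v.toNat) (pvRecB adjRight adj).2
        else (pvRecB adjRight red).2)
      = min (pvRecB adjRight red).2 (PySem.Int.bor ((1:Int) <<< v.toNat) (pvRecB adjRight adj).2) := by
    rw [min_def]; split_ifs <;> omega
  rw [hminEq]
  simp only [PySem.List.pySetD_of_nonneg _ _ (le_of_lt hb0),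
    show ((j : Int) + 1).toNat = j + 1 from by omega]
  have hcast : (((j+1 : Nat)) : Int) = (j : Int) + 1 := by push_cast; ring
  split_ifs with hA1 hA2
  · refine ⟨by simpa using hl1, by simpa using hl2, ?_, ?_⟩
    · intro i hi
      have hi' : i < t := by simpa [hl1] using hi
      rw [List.getElem_set]
      split
      · next he =>
        rw [← he, if_pos (by omega), hcast, recb, if_pos hA1]
      · next he =>
        rw [hS i (by omega)]
        split_ifs with g1 g2 g2
        · rfl
        · omega
        · omega
        · rfl
    · intro i hi
      have hi' : i < t := by simpa [hl2] using hi
      rw [List.getElem_set]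
      split
      · next he =>
        rw [← he, if_pos (by omega), hcast, recb, if_pos hA1]
      · next he =>
        rw [hM i (by omega)]
        split_ifs with g1 g2 g2
        · rfl
        · omega
        · omega
        · rfl
  · refine ⟨by simpa using hl1, by simpa using hl2, ?_, ?_⟩
    · intro i hi
      have hi' : i < t := by simpa [hl1] using hi
      rw [List.getElem_set]
      split
      · next he =>
        rw [← he, if_pos (by omega), hcast, recb, if_neg hA1, if_pos (by omega)]
      · next he =>
        rw [hS i (by omega)]
        split_ifs with g1 g2 g2
        · rfl
        · omega
        · omega
        · rfl
    · intro i hi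
      have hi' : i < t := by simpa [hl2] using hi
      rw [List.getElem_set]
      split
      · next he =>
        rw [← he, if_pos (by omega), hcast, recb, if_neg hA1, if_pos (by omega)]
      · next he =>
        rw [hM i (by omega)]
        split_ifs with g1 g2 g2
        · rfl
        · omega
        · omega
        · rfl
  · refine ⟨by simpa using hl1, by simpa using hl2, ?_, ?_⟩
    · intro i hi
      have hi' : i < t := by simpa [hl1] using hi
      rw [List.getElem_set]
      split
      · next he =>
        rw [← he, if_pos (by omega), hcast, recb, if_neg hA1, if_neg (by omega)]
      · next he =>
        rw [hS i (by omega)]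
        split_ifs with g1 g2 g2
        · rfl
        · omega
        · omega
        · rfl
    · intro i hi
      have hi' : i < t := by simpa [hl2] using hi
      rw [List.getElem_set]
      split
      · next he =>
        rw [← he, if_pos (by omega), hcast, recb, if_neg hA1, if_neg (by omega)]
      · next he =>
        rw [hM i (by omega)]
        split_ifs with g1 g2 g2
        · rfl
        · omega
        · omega
        · rfl

lemma pvLoop (adjRight : List Int) (t : Nat) (j : Nat) (hj : j < t) :
    pvInv adjRight t j
      ((PySem.List.pyRange 1 ((j : Int) + 1) 1).foldl (pvStepA adjRight)
        (List.replicate t 0, List.replicate t 0)) := by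
  induction j with
  | zero =>
    rw [PySem.List.pyRange_one_eq_nil (by omega)]
    simp only [List.foldl_nil]
    refine ⟨by simp, by simp, ?_, ?_⟩ <;>
    · intro i hi
      simp only [List.getElem_replicate]
      split
      · next h => interval_cases i; rw [show ((0:Nat):Int) = 0 from rfl, pvRecB_zero]
      · rfl
  | succ j ih =>
    rw [show (((j+1 : Nat) : Int) + 1) = ((j : Int) + 1) + 1 from by push_cast; ring,
      PySem.List.pyRange_one_succ_right (by omega), List.foldl_append]
    simp only [List.foldl_cons, List.foldl_nil]
    exact pvStep adjRight t j _ hj (ih (by omega))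

-- ===== VERDICT (by name: the statement is the Claim_ definition above) =====
lemma pvMain (nRight : Int) (adjRight : List Int) :
    get_sizes_right nRight adjRight = get_sizes_right_alt nRight adjRight := by
  rw [pvPortA_eq]
  unfold get_sizes_right_alt
  obtain ⟨T, hT⟩ : ∃ T : Nat, 2^nRight.toNat = T := ⟨_, rfl⟩
  have hN : ((1:Int) <<< nRight.toNat) = ((T : Nat) : Int) := by rw [pvShlOne, hT]
  have ht1 : 1 ≤ T := hT ▸ Nat.one_le_two_pow
  have hNt : ((1:Int) <<< nRight.toNat).toNat = T := by
    rw [hN]; exact Int.toNat_natCast _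
  have hrange : PySem.List.pyRange 1 ((1:Int) <<< nRight.toNat) 1 =
      PySem.List.pyRange 1 (((T - 1 : Nat) : Int) + 1) 1 := by
    rw [hN]; congr 1; push_cast [Nat.cast_sub ht1]; ring
  rw [hrange, hNt]
  obtain ⟨hl1, hl2, hS, hM⟩ := pvLoop adjRight T (T - 1) (by omega)
  have hlen2 : ((PySem.List.pyRange 0 ((1:Int) <<< nRight.toNat) 1).map (pvRecB adjRight)).length
      = T := by
    rw [List.length_map, PySem.List.length_pyRange_one, hN]; omega
  refine Prod.ext ?_ ?_
  · apply List.ext_getElem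
    · rw [hl1, List.length_map, hlen2]
    · intro i h1 h2
      rw [hS i h1, if_pos (by rw [hl1] at h1; omega)]
      rw [List.getElem_map, List.getElem_map, PySem.List.getElem_pyRange_one, zero_add]
  · apply List.ext_getElem
    · rw [hl2, List.length_map, hlen2]
    · intro i h1 h2
      rw [hM i h1, if_pos (by rw [hl2] at h1; omega)]
      rw [List.getElem_map, List.getElem_map, PySem.List.getElem_pyRange_one, zero_add]

-- ===== VERDICT (by name: the statement is the Claim_ definition above) =====
theorem get_sizes_right_spec : Claim_equal_get_sizes_right := by
  intro nRight adjRight _ _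
  unfold Spec_get_sizes_right
  exact pvMain nRight adjRight
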